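-- pv_equiv track=rewrite | github.com/YangYeojin/programmers | 연속된 값의 합이 5.py | linksum0
-- ===== SOURCE A (Python) =====
-- def linksum0(li, sumV):
--     answer = 0
--     for i in range(len(li)):
--         if li[i] == 5:
--             answer += 1
--         else:
--             for j in range(sumV):
--                 if sum(li[i:i+j]) == 5:
--                     answer += 1
--     return answer
-- ===== SOURCE B (Python) =====
-- def linksum0(li, sumV):
--     n = len(li)
--     prefix = [0]
--     acc = 0
--     for x in li:
--         acc += x
--         prefix.append(acc)
--     answer = 0
--     for i in range(n):
--         if li[i] == 5:
--             answer += 1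
--         else:
--             m = min(sumV, n - i + 1)
--             for j in range(m):
--                 if prefix[i + j] - prefix[i] == 5:
--                     answer += 1
--             extra = sumV - m
--             if extra > 0 and prefix[n] - prefix[i] == 5:
--                 answer += extra
--     return answer
-- ===== Notes on version B (the rewrite author's own statement) =====
-- stated objective: faster
-- what changed: B precomputes a prefix-sum list once so each slice sum becomes a subtraction of two prefix sums, and collapses the clamped tail of the j-range (where every slice is the same full suffix) into one multiplication instead of re-summing slices.
import Mathlib
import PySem

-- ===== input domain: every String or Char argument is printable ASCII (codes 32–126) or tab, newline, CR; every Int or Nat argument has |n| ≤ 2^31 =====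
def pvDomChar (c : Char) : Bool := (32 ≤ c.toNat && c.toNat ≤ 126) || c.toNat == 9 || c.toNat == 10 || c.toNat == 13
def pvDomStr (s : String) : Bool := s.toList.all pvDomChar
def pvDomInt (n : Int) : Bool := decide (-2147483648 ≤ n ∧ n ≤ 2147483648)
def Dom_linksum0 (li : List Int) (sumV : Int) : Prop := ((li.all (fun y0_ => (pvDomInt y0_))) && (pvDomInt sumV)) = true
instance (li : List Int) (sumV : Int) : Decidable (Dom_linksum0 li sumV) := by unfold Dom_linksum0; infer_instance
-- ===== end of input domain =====

-- B precomputes prefix sums so each slice sum is one subtraction and the clamped tail of the j-range is one multiplication (faster; return value only, no mutation).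

-- ===== PORT A =====
def linksum0 (li : List Int) (sumV : Int) : Int :=
  (PySem.List.pyRange 0 (li.length : Int) 1).foldl (fun answer i =>
    if PySem.List.pyGetD li i 0 == 5 then answer + 1
    else
      (PySem.List.pyRange 0 sumV 1).foldl (fun acc j =>
        if (PySem.List.slice li (some i) (some (i + j))).sum == 5 then acc + 1 else acc) answer) 0

-- ===== PORT B =====
def linksum0_alt (li : List Int) (sumV : Int) : Int :=
  let n : Int := li.length
  let pa := li.foldl (fun (p : List Int × Int) x => (p.1 ++ [p.2 + x], p.2 + x)) ([0], 0)
  let pre := pa.1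
  (PySem.List.pyRange 0 n 1).foldl (fun answer i =>
    if PySem.List.pyGetD li i 0 == 5 then answer + 1
    else
      let m := min sumV (n - i + 1)
      let answer' :=
        (PySem.List.pyRange 0 m 1).foldl (fun acc j =>
          if PySem.List.pyGetD pre (i + j) 0 - PySem.List.pyGetD pre i 0 == 5 then acc + 1 else acc) answer
      let extra := sumV - m
      if extra > 0 && (PySem.List.pyGetD pre n 0 - PySem.List.pyGetD pre i 0 == 5) then answer' + extra
      else answer') 0

-- ===== PRECONDITION & SPEC =====
def Spec_linksum0 (li : List Int) (sumV : Int) (out : Int) : Prop := out = linksum0_alt li sumV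
instance (li : List Int) (sumV : Int) (out : Int) : Decidable (Spec_linksum0 li sumV out) := by unfold Spec_linksum0; infer_instance

-- ===== CLAIM (what is proved, stated in full; the proofs are below) =====
def Claim_equal_linksum0 : Prop := ∀ (li : List Int) (sumV : Int), Dom_linksum0 li sumV → Spec_linksum0 li sumV (linksum0 li sumV)

-- ===== LEMMAS AND PROOFS =====

-- the prefix-building loop of B produces the list of prefix sums
theorem pv_prefix_foldl (li : List Int) (p : List Int) (s : Int) :
    li.foldl (fun (q : List Int × Int) x => (q.1 ++ [q.2 + x], q.2 + x)) (p, s)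
      = (p ++ (List.range li.length).map (fun k => s + (li.take (k+1)).sum), s + li.sum) := by
  induction li generalizing p s with
  | nil => simp
  | cons x li ih =>
    simp only [List.foldl_cons, ih, List.length_cons, List.range_succ_eq_map, List.map_cons,
      List.map_map]
    simp [Function.comp, add_assoc, List.take_succ_cons]

theorem pv_prefix_get (li : List Int) (k : Nat) (hk : k ≤ li.length) :
    PySem.List.pyGetD
      ((li.foldl (fun (q : List Int × Int) x => (q.1 ++ [q.2 + x], q.2 + x)) ([0], 0)).1)
      (k : Int) 0 = (li.take k).sum := by
  rw [pv_prefix_foldl]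
  simp only [PySem.List.pyGetD_natCast]
  cases k with
  | zero => simp
  | succ k =>
    have hk' : k < li.length := by omega
    rw [List.getD_eq_getElem?_getD]
    simp [hk']

-- slice sum via prefix sums, in-range case
theorem pv_slice_sum (li : List Int) (a b : Nat) :
    (PySem.List.slice li (some (a : Int)) (some ((a : Int) + (b : Int)))).sum
      = (li.take (a + b)).sum - (li.take a).sum := by
  rw [PySem.List.slice_natCast_add, List.take_add, List.sum_append]
  ring

-- slice sum, clamped (past-the-end) case: the slice is the whole suffix
theorem pv_slice_sum_tail (li : List Int) (a b : Nat) (hb : li.length ≤ a + b) :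
    (PySem.List.slice li (some (a : Int)) (some ((a : Int) + (b : Int)))).sum
      = li.sum - (li.take a).sum := by
  rw [PySem.List.slice_natCast_add, List.take_of_length_le (by simp; omega)]
  have h := List.sum_take_add_sum_drop li a
  linarith

-- equality of the two inner loops, for one index a of the outer loop
theorem pv_inner_eq (li : List Int) (sumV : Int) (pre : List Int)
    (hpre : ∀ k : Nat, k ≤ li.length → PySem.List.pyGetD pre (k : Int) 0 = (li.take k).sum)
    (a : Nat) (ha : a < li.length) (answer : Int) :
    (PySem.List.pyRange 0 sumV 1).foldl (fun acc j =>
        if (PySem.List.slice li (some (a : Int)) (some ((a : Int) + j))).sum == 5 then acc + 1 else acc) answer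
    = (let m := min sumV ((li.length : Int) - (a : Int) + 1);
       let answer' := (PySem.List.pyRange 0 m 1).foldl (fun acc j =>
          if PySem.List.pyGetD pre ((a : Int) + j) 0 - PySem.List.pyGetD pre (a : Int) 0 == 5 then acc + 1 else acc) answer;
       if (sumV - m > 0) && (PySem.List.pyGetD pre (li.length : Int) 0 - PySem.List.pyGetD pre (a : Int) 0 == 5)
       then answer' + (sumV - m) else answer') := by
  have hpa : ∀ (m : Int), m ≤ (li.length : Int) - (a : Int) + 1 →
      (PySem.List.pyRange 0 m 1).countP (fun j =>
          PySem.List.pyGetD pre ((a : Int) + j) 0 - PySem.List.pyGetD pre (a : Int) 0 == 5)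
      = (PySem.List.pyRange 0 m 1).countP (fun j =>
          (PySem.List.slice li (some (a : Int)) (some ((a : Int) + j))).sum == 5) := by
    intro m hm
    refine List.countP_congr (fun j hj => ?_)
    rw [PySem.List.mem_pyRange_one] at hj
    obtain ⟨b, rfl⟩ := Int.eq_ofNat_of_zero_le hj.1
    rw [pv_slice_sum, show ((a : Int) + (b : Int)) = ((a + b : Nat) : Int) by push_cast; ring,
      hpre (a + b) (by omega), hpre a (by omega)]
  simp only [PySem.List.foldl_if_add_one]
  by_cases hsm : sumV ≤ (li.length : Int) - (a : Int) + 1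
  · simp only [min_eq_left hsm]
    rw [hpa sumV hsm]
    simp
  · have hlt : (li.length : Int) - (a : Int) + 1 < sumV := by omega
    simp only [min_eq_right (le_of_lt hlt)]
    rw [hpa _ le_rfl, hpre li.length le_rfl, hpre a (by omega), List.take_length]
    set mI : Int := (li.length : Int) - (a : Int) + 1 with hmdef
    rw [PySem.List.pyRange_one_append 0 mI sumV (by omega) (by omega), List.countP_append]
    have htail : (PySem.List.pyRange mI sumV 1).countP (fun j =>
        (PySem.List.slice li (some (a : Int)) (some ((a : Int) + j))).sum == 5)
        = if li.sum - (li.take a).sum = 5 then (sumV - mI).toNat else 0 := by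
      by_cases hc : li.sum - (li.take a).sum = 5
      · rw [if_pos hc]
        rw [List.countP_eq_length.mpr (fun j hj => ?_), PySem.List.length_pyRange_one]
        rw [PySem.List.mem_pyRange_one] at hj
        obtain ⟨b, rfl⟩ := Int.eq_ofNat_of_zero_le (by omega : (0:Int) ≤ j)
        rw [pv_slice_sum_tail li a b (by omega)]
        simp [hc]
      · rw [if_neg hc, List.countP_eq_zero.mpr (fun j hj => ?_)]
        rw [PySem.List.mem_pyRange_one] at hj
        obtain ⟨b, rfl⟩ := Int.eq_ofNat_of_zero_le (by omega : (0:Int) ≤ j)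
        rw [pv_slice_sum_tail li a b (by omega)]
        simp [hc]
    rw [htail]
    by_cases hc : li.sum - (li.take a).sum = 5
    · have hpos : (0 : Int) < sumV - mI := by omega
      simp only [hc, beq_self_eq_true, Bool.and_true, gt_iff_lt, hpos,
        decide_true, if_true]
      push_cast [Int.toNat_of_nonneg (le_of_lt hpos)]
      ring
    · simp [hc]

theorem linksum0_spec : Claim_equal_linksum0 := by
  intro li sumV _
  show linksum0 li sumV = linksum0_alt li sumV
  unfold linksum0 linksum0_alt
  simp only []
  refine PySem.List.foldl_congr_mem' _ _ _ _ (fun i hi answer => ?_)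
  rw [PySem.List.mem_pyRange_one] at hi
  obtain ⟨a, rfl⟩ := Int.eq_ofNat_of_zero_le hi.1
  have ha : a < li.length := by exact_mod_cast hi.2
  by_cases h5 : (PySem.List.pyGetD li (a : Int) 0 == 5) = true
  · rw [if_pos h5, if_pos h5]
  · rw [if_neg h5, if_neg h5]
    exact pv_inner_eq li sumV _ (fun k hk => pv_prefix_get li k hk) a ha answer
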